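-- pv_equiv track=rewrite | github.com/noedelorme/conpra | testcase-contest/solution_weak_warmup/SoupDelivery_MichaelRaskin_0.py | best_add
-- ===== SOURCE A (Python) =====
-- def add_facility(used, chosen, f, fc, dc):
--     res = {}
--     delta = fc[f]
--     for c in chosen:
--         old = chosen[c]
--         if dc[f][c] < dc[old][c]:
--             res[c] = f
--             delta += dc[f][c] - dc[old][c]
--         else:
--             res[c] = old
--     return res, delta
--
-- def best_add(used, chosen, fc, dc, threshold):
--     opt = (None, chosen, 0)
--     opt_delta = threshold
--     for f in range(len(fc)):
--         if not f in used:
--             new_choice, delta = add_facility(used, chosen, f, fc, dc)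
--             if delta < opt_delta:
--                 opt_delta = delta
--                 opt = (f, new_choice, opt_delta)
--     return opt
-- ===== SOURCE B (Python) =====
-- def best_add(used, chosen, fc, dc, threshold):
--     # Transposed computation: one delta table over all candidate facilities,
--     # updated client-by-client (clients outer, facilities inner).
--     cands = [f for f in range(len(fc)) if f not in used]
--     delta = [fc[f] for f in cands]
--     for c, old in chosen.items():
--         for i, f in enumerate(cands):
--             t = dc[f][c] - dc[old][c]
--             if t < 0:
--                 delta[i] += t
--     best_f = None
--     best_delta = threshold
--     for f, d in zip(cands, delta):
--         if d < best_delta: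
--             best_f, best_delta = f, d
--     if best_f is None:
--         return (None, chosen, 0)
--     new_choice = {c: (best_f if dc[best_f][c] < dc[old][c] else old)
--                   for c, old in chosen.items()}
--     return (best_f, new_choice, best_delta)
-- ===== Notes on version B (the rewrite author's own statement) =====
-- stated objective: alternative
-- what changed: B transposes the loop nesting: instead of scoring each facility in turn with its own pass over the clients (building a dict per candidate), it keeps one running delta table over all candidate facilities and updates it client-by-client (clients outer, facilities inner), then argmins the table in one scan and reconstructs the assignment dict only for the winner.
import Mathlib
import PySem

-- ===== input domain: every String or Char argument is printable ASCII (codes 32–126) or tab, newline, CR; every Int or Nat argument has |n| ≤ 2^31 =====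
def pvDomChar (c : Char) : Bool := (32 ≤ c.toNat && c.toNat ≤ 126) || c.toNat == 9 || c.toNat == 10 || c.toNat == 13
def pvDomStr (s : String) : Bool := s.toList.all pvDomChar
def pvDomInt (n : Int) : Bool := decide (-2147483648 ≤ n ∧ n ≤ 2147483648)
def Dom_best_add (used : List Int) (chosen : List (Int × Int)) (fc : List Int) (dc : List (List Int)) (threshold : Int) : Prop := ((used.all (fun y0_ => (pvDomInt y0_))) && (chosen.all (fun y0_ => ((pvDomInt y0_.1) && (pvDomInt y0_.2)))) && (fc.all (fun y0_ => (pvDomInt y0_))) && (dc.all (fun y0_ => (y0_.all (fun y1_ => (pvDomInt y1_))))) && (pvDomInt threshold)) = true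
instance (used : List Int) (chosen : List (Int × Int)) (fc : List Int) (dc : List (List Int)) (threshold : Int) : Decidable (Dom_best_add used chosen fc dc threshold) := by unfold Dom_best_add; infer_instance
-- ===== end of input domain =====

-- B transposes the loop nesting: one running delta table over all candidate facilities,
-- updated client-by-client, then a single argmin scan and one dict reconstruction for the
-- winner (objective: alternative).

-- ===== PORT A =====
-- one step of add_facility's loop over the items of chosen (c = p.1, old = p.2)
def addFacilityStep (f : Int) (dc : List (List Int)) (st : PySem.Dict Int Int × Int) (p : Int × Int) : PySem.Dict Int Int × Int :=
  let dfc := PySem.List.pyGetD (PySem.List.pyGetD dc f []) p.1 0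
  let doc := PySem.List.pyGetD (PySem.List.pyGetD dc p.2 []) p.1 0
  if dfc < doc then (st.1.insert p.1 f, st.2 + (dfc - doc)) else (st.1.insert p.1 p.2, st.2)

def add_facility (used : List Int) (chosen : List (Int × Int)) (f : Int) (fc : List Int) (dc : List (List Int)) : PySem.Dict Int Int × Int :=
  chosen.foldl (addFacilityStep f dc) (PySem.Dict.empty, PySem.List.pyGetD fc f 0)

def best_add (used : List Int) (chosen : List (Int × Int)) (fc : List Int) (dc : List (List Int)) (threshold : Int) : Option Int × (List (Int × Int)) × Int :=
  ((PySem.List.pyRange 0 fc.length 1).foldl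
    (fun (st : (Option Int × (List (Int × Int)) × Int) × Int) f =>
      if f ∉ used then
        let r := add_facility used chosen f fc dc
        if r.2 < st.2 then ((some f, r.1.items, r.2), r.2) else st
      else st)
    ((none, chosen, 0), threshold)).1

-- ===== PORT B =====
-- port of Source B: candidate list, delta table updated client-by-client (the inner
-- `for i, f in enumerate(cands): delta[i] += t` is zipWith over cands and delta),
-- argmin scan over zip(cands, delta), then one reconstruction of the winner's dict
-- (the dict comprehension over chosen.items(), exact on nodup keys, which Pre_ ensures).
def best_add_alt (used : List Int) (chosen : List (Int × Int)) (fc : List Int) (dc : List (List Int)) (threshold : Int) : Option Int × (List (Int × Int)) × Int :=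
  let cands := (PySem.List.pyRange 0 fc.length 1).filter (fun f => !used.contains f)
  let delta0 := cands.map (fun f => PySem.List.pyGetD fc f 0)
  let delta := chosen.foldl
    (fun dl p =>
      List.zipWith (fun f d =>
        let t := PySem.List.pyGetD (PySem.List.pyGetD dc f []) p.1 0 -
                 PySem.List.pyGetD (PySem.List.pyGetD dc p.2 []) p.1 0
        if t < 0 then d + t else d) cands dl) delta0
  match (cands.zip delta).foldl
      (fun (st : Option Int × Int) fd => if fd.2 < st.2 then (some fd.1, fd.2) else st)
      (none, threshold) with
  | (none, _) => (none, chosen, 0)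
  | (some f, d) =>
      (some f,
       chosen.map (fun p =>
         if PySem.List.pyGetD (PySem.List.pyGetD dc f []) p.1 0 <
            PySem.List.pyGetD (PySem.List.pyGetD dc p.2 []) p.1 0
         then (p.1, f) else (p.1, p.2)),
       d)

-- ===== PRECONDITION & SPEC =====
-- Pre_ excludes (a) assoc lists with duplicate keys, which do not represent a Python dict
-- (the `chosen` argument is a dict in Python, so its keys are distinct), and (b) inputs where
-- A raises IndexError because some dc lookup dc[f][c]/dc[old][c] is out of range.
def Pre_best_add (used : List Int) (chosen : List (Int × Int)) (fc : List Int) (dc : List (List Int)) (threshold : Int) : Prop :=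
  (chosen.map Prod.fst).Nodup ∧
  ∀ f ∈ PySem.List.pyRange 0 fc.length 1, f ∉ used →
    ∀ p ∈ chosen,
      PySem.Raise.InRange dc.length f ∧
      PySem.Raise.InRange dc.length p.2 ∧
      PySem.Raise.InRange (PySem.List.pyGetD dc f []).length p.1 ∧
      PySem.Raise.InRange (PySem.List.pyGetD dc p.2 []).length p.1
instance (used : List Int) (chosen : List (Int × Int)) (fc : List Int) (dc : List (List Int)) (threshold : Int) : Decidable (Pre_best_add used chosen fc dc threshold) := by unfold Pre_best_add; infer_instance

def pvWitness_best_add : List Int × (List (Int × Int)) × List Int × List (List Int) × Int :=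
  ([], [(0, 0)], [1], [[0]], 0)

def Spec_best_add (used : List Int) (chosen : List (Int × Int)) (fc : List Int) (dc : List (List Int)) (threshold : Int) (out : Option Int × (List (Int × Int)) × Int) : Prop := out = best_add_alt used chosen fc dc threshold
instance (used : List Int) (chosen : List (Int × Int)) (fc : List Int) (dc : List (List Int)) (threshold : Int) (out : Option Int × (List (Int × Int)) × Int) : Decidable (Spec_best_add used chosen fc dc threshold out) := by unfold Spec_best_add; infer_instance

-- ===== CLAIM (what is proved, stated in full; the proofs are below) =====
def Claim_equal_best_add : Prop := ∀ (used : List Int) (chosen : List (Int × Int)) (fc : List Int) (dc : List (List Int)) (threshold : Int), Dom_best_add used chosen fc dc threshold → Pre_best_add used chosen fc dc threshold → Spec_best_add used chosen fc dc threshold (best_add used chosen fc dc threshold)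

-- ===== LEMMAS AND PROOFS =====

-- cost difference for client p when facility f is considered
def term (dc : List (List Int)) (f : Int) (p : Int × Int) : Int :=
  PySem.List.pyGetD (PySem.List.pyGetD dc f []) p.1 0 -
  PySem.List.pyGetD (PySem.List.pyGetD dc p.2 []) p.1 0

-- the score A's add_facility accumulates for facility f
def scoreB (chosen : List (Int × Int)) (f : Int) (fc : List Int) (dc : List (List Int)) : Int :=
  chosen.foldl (fun a p => a + min 0 (term dc f p)) (PySem.List.pyGetD fc f 0)

-- the value A's dict assigns to client p.1 when facility f is added
def assignVal (dc : List (List Int)) (f : Int) (p : Int × Int) : Int :=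
  if PySem.List.pyGetD (PySem.List.pyGetD dc f []) p.1 0 <
     PySem.List.pyGetD (PySem.List.pyGetD dc p.2 []) p.1 0
  then f else p.2

lemma snd_addFacility_fold (f : Int) (dc : List (List Int)) :
    ∀ (l : List (Int × Int)) (d : PySem.Dict Int Int) (δ : Int),
      (l.foldl (addFacilityStep f dc) (d, δ)).2 =
      l.foldl (fun a p => a + min 0 (term dc f p)) δ := by
  intro l
  induction l with
  | nil => intro d δ; rfl
  | cons p l ih =>
    intro d δ
    simp only [List.foldl_cons, addFacilityStep, term]
    split
    · rw [ih]; congr 1; omega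
    · rw [ih]; congr 1; omega

lemma fst_addFacility_fold (f : Int) (dc : List (List Int)) :
    ∀ (l : List (Int × Int)) (d : PySem.Dict Int Int) (δ : Int),
      (l.foldl (addFacilityStep f dc) (d, δ)).1 =
      l.foldl (fun d p => d.insert p.1 (assignVal dc f p)) d := by
  intro l
  induction l with
  | nil => intro d δ; rfl
  | cons p l ih =>
    intro d δ
    simp only [List.foldl_cons, addFacilityStep]
    by_cases h : PySem.List.pyGetD (PySem.List.pyGetD dc f []) p.1 0 <
        PySem.List.pyGetD (PySem.List.pyGetD dc p.2 []) p.1 0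
    · rw [if_pos h, ih, show assignVal dc f p = f by simp [assignVal, h]]
    · rw [if_neg h, ih, show assignVal dc f p = p.2 by simp [assignVal, h]]

lemma add_facility_snd (used : List Int) (chosen : List (Int × Int)) (f : Int) (fc : List Int) (dc : List (List Int)) :
    (add_facility used chosen f fc dc).2 = scoreB chosen f fc dc := by
  unfold add_facility scoreB
  exact snd_addFacility_fold f dc chosen PySem.Dict.empty _

lemma add_facility_items (used : List Int) (chosen : List (Int × Int)) (f : Int) (fc : List Int) (dc : List (List Int))
    (hnd : (chosen.map Prod.fst).Nodup) :
    (add_facility used chosen f fc dc).1.items =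
      chosen.map (fun p =>
        if PySem.List.pyGetD (PySem.List.pyGetD dc f []) p.1 0 <
           PySem.List.pyGetD (PySem.List.pyGetD dc p.2 []) p.1 0
        then (p.1, f) else (p.1, p.2)) := by
  unfold add_facility
  rw [fst_addFacility_fold]
  rw [PySem.Dict.items_foldl_insert_fresh chosen Prod.fst (assignVal dc f) PySem.Dict.empty
      (by intro a ha; exact PySem.Dict.contains_empty _) hnd]
  simp only [PySem.Dict.empty, List.nil_append]
  apply List.map_congr_left
  intro p hp
  unfold assignVal
  split <;> rfl

-- renders the compact (best facility, best delta) state as A's loop state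
def renderSt (used : List Int) (chosen : List (Int × Int)) (fc : List Int) (dc : List (List Int)) :
    Option Int × Int → (Option Int × (List (Int × Int)) × Int) × Int
  | (none, d) => ((none, chosen, 0), d)
  | (some f, d) => ((some f, (add_facility used chosen f fc dc).1.items, d), d)

lemma stepA_renderSt (used : List Int) (chosen : List (Int × Int)) (fc : List Int) (dc : List (List Int))
    (st : Option Int × Int) (f : Int) :
    (if f ∉ used then
       let r := add_facility used chosen f fc dc
       if r.2 < (renderSt used chosen fc dc st).2 then ((some f, r.1.items, r.2), r.2)
       else renderSt used chosen fc dc st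
     else renderSt used chosen fc dc st) =
    renderSt used chosen fc dc
      (if f ∉ used then
         (if scoreB chosen f fc dc < st.2 then (some f, scoreB chosen f fc dc) else st)
       else st) := by
  have hsnd : (renderSt used chosen fc dc st).2 = st.2 := by
    rcases st with ⟨_ | _, d⟩ <;> rfl
  by_cases hu : f ∉ used
  · simp only [if_pos hu, add_facility_snd, hsnd]
    by_cases hlt : scoreB chosen f fc dc < st.2
    · rw [if_pos hlt, if_pos hlt]; rfl
    · rw [if_neg hlt, if_neg hlt]
  · simp only [if_neg hu]

lemma loop_invariant (used : List Int) (chosen : List (Int × Int)) (fc : List Int) (dc : List (List Int)) :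
    ∀ (fs : List Int) (st : Option Int × Int),
      fs.foldl
        (fun st f =>
          if f ∉ used then
            let r := add_facility used chosen f fc dc
            if r.2 < st.2 then ((some f, r.1.items, r.2), r.2) else st
          else st)
        (renderSt used chosen fc dc st) =
      renderSt used chosen fc dc
        (fs.foldl
          (fun st f =>
            if f ∉ used then
              (if scoreB chosen f fc dc < st.2 then (some f, scoreB chosen f fc dc) else st)
            else st)
          st) := by
  intro fs
  induction fs with
  | nil => intro st; rfl
  | cons f fs ih =>
    intro st
    simp only [List.foldl_cons]
    rw [stepA_renderSt]
    exact ih _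

-- B side: the delta-table fold computes scoreB pointwise
lemma zipWith_self_map {α β : Type} (h : α → α → β) :
    ∀ (l : List α), List.zipWith h l l = l.map (fun a => h a a) := by
  intro l; induction l with
  | nil => rfl
  | cons a l ih => simp only [List.zipWith, List.map]; rw [ih]

lemma delta_table_map (dc : List (List Int)) (cands : List Int) :
    ∀ (l : List (Int × Int)) (g : Int → Int),
      l.foldl
        (fun dl p =>
          List.zipWith (fun f d =>
            let t := PySem.List.pyGetD (PySem.List.pyGetD dc f []) p.1 0 -
                     PySem.List.pyGetD (PySem.List.pyGetD dc p.2 []) p.1 0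
            if t < 0 then d + t else d) cands dl) (cands.map g) =
      cands.map (fun f => l.foldl (fun a p => a + min 0 (term dc f p)) (g f)) := by
  intro l
  induction l with
  | nil => intro g; rfl
  | cons p l ih =>
    intro g
    simp only [List.foldl_cons]
    have hstep :
        List.zipWith (fun f d =>
            let t := PySem.List.pyGetD (PySem.List.pyGetD dc f []) p.1 0 -
                     PySem.List.pyGetD (PySem.List.pyGetD dc p.2 []) p.1 0
            if t < 0 then d + t else d) cands (cands.map g) =
        cands.map (fun f => g f + min 0 (term dc f p)) := by
      rw [List.zipWith_map_right, zipWith_self_map]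
      apply List.map_congr_left
      intro f _
      simp only [term]
      split <;> omega
    rw [hstep, ih]

-- B side: the argmin scan over zip(cands, map s cands) is a plain fold over cands
lemma argmin_zip_map (s : Int → Int) :
    ∀ (l : List Int) (init : Option Int × Int),
      (l.zip (l.map s)).foldl
        (fun (st : Option Int × Int) fd => if fd.2 < st.2 then (some fd.1, fd.2) else st) init =
      l.foldl (fun (st : Option Int × Int) f => if s f < st.2 then (some f, s f) else st) init := by
  intro l
  induction l with
  | nil => intro init; rfl
  | cons f l ih =>
    intro init
    simp only [List.map_cons, List.zip_cons_cons, List.foldl_cons]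
    exact ih _

-- filtering by `f not in used` up front equals guarding inside the loop
lemma foldl_filter_guard {β : Type} (used : List Int) (g : β → Int → β) :
    ∀ (l : List Int) (init : β),
      (l.filter (fun f => !used.contains f)).foldl g init =
      l.foldl (fun st f => if f ∉ used then g st f else st) init := by
  intro l
  induction l with
  | nil => intro init; rfl
  | cons f l ih =>
    intro init
    by_cases h : f ∈ used
    · have hc : (!used.contains f) = false := by simp [h]
      rw [List.filter_cons, hc, if_neg Bool.false_ne_true]
      simp only [List.foldl_cons]
      rw [if_neg (fun hn => hn h)]
      exact ih init
    · have hc : (!used.contains f) = true := by simp [h]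
      rw [List.filter_cons, hc, if_pos rfl]
      simp only [List.foldl_cons]
      rw [if_pos h]
      exact ih (g init f)

-- best_add_alt with its lets unfolded (definitional)
lemma best_add_alt_unfold (used : List Int) (chosen : List (Int × Int)) (fc : List Int) (dc : List (List Int)) (threshold : Int) :
    best_add_alt used chosen fc dc threshold =
    (match (((PySem.List.pyRange 0 fc.length 1).filter (fun f => !used.contains f)).zip
        (chosen.foldl
          (fun dl p =>
            List.zipWith (fun f d =>
              let t := PySem.List.pyGetD (PySem.List.pyGetD dc f []) p.1 0 -
                       PySem.List.pyGetD (PySem.List.pyGetD dc p.2 []) p.1 0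
              if t < 0 then d + t else d)
              ((PySem.List.pyRange 0 fc.length 1).filter (fun f => !used.contains f)) dl)
          (((PySem.List.pyRange 0 fc.length 1).filter (fun f => !used.contains f)).map
            (fun f => PySem.List.pyGetD fc f 0)))).foldl
        (fun (st : Option Int × Int) fd => if fd.2 < st.2 then (some fd.1, fd.2) else st)
        (none, threshold) with
    | (none, _) => (none, chosen, 0)
    | (some f, d) =>
        (some f,
         chosen.map (fun p =>
           if PySem.List.pyGetD (PySem.List.pyGetD dc f []) p.1 0 <
              PySem.List.pyGetD (PySem.List.pyGetD dc p.2 []) p.1 0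
           then (p.1, f) else (p.1, p.2)),
         d)) := rfl

-- ===== VERDICT (by name: the statement is the Claim_ definition above) =====
theorem best_add_spec : Claim_equal_best_add := by
  intro used chosen fc dc threshold _hdom hpre
  unfold Spec_best_add best_add
  have hA := loop_invariant used chosen fc dc (PySem.List.pyRange 0 fc.length 1) (none, threshold)
  simp only [renderSt] at hA
  rw [hA, best_add_alt_unfold]
  rw [delta_table_map dc _ chosen (fun f => PySem.List.pyGetD fc f 0)]
  have hs : (fun f => List.foldl (fun a p => a + min 0 (term dc f p)) (PySem.List.pyGetD fc f 0) chosen) =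
      (fun f => scoreB chosen f fc dc) := rfl
  rw [hs,
      argmin_zip_map (fun f => scoreB chosen f fc dc),
      foldl_filter_guard used
        (fun (st : Option Int × Int) f =>
          if scoreB chosen f fc dc < st.2 then (some f, scoreB chosen f fc dc) else st)]
  rcases hfin : (PySem.List.pyRange 0 fc.length 1).foldl
      (fun (st : Option Int × Int) f =>
        if f ∉ used then
          (if scoreB chosen f fc dc < st.2 then (some f, scoreB chosen f fc dc) else st)
        else st)
      (none, threshold) with ⟨_ | f, d⟩
  · rfl
  · exact congrArg (fun l => (some f, l, d)) (add_facility_items used chosen f fc dc hpre.1)
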